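-- pv_equiv track=rewrite | github.com/pietroppeter/AdventOfCode2018 | python/day11.py | solve
-- ===== SOURCE A (Python) =====
-- import itertools
--
-- def hundred_digit(number):
--     number = str(number)
--     if len(number) > 2:
--         return int(number[-3])
--     else:
--         return 0
--
-- def power_level(x, y, serial):
--     rack_id = x + 10
--     return hundred_digit((rack_id*y + serial)*rack_id) - 5
--
-- def square_total_power(x, y, serial, size):
--     if size <= 3:
--         return sum([power_level(x + i, y + j, serial) for i in range(size) for j in range(size)])
--     return square_total_power(x, y, serial, size - 1) \
--            + sum([power_level(x + i, y + size - 1, serial) for i in range(size - 1)]) \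
--            + sum([power_level(x + size - 1, y + j, serial) for j in range(size)])
--
-- def solve(serial, size=300, size_square=None):
--     if size_square is None:
--         size_square = [3]
--     max_power = -100
--     xs, ys = None, None
--     best_square_size = None
--     for square in size_square:
--         for x, y in itertools.product(range(1, size - square + 1), range(1, size  - square + 1)):
--             power = square_total_power(x, y, serial, square)
--             if power > max_power:
--                 max_power = power
--                 xs, ys = x, y
--                 best_square_size = square
--     return max_power, xs, ys, best_square_size
-- ===== SOURCE B (Python) =====
-- def hundred_digit(number):
--     number = str(number)
--     if len(number) > 2:
--         return int(number[-3])
--     else: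
--         return 0
--
-- def power_level(x, y, serial):
--     rack_id = x + 10
--     return hundred_digit((rack_id*y + serial)*rack_id) - 5
--
-- def solve(serial, size=300, size_square=None):
--     if size_square is None:
--         size_square = [3]
--     # largest cell coordinate any query can touch is size - 1
--     m = size - 1 if size > 1 else 0
--     # summed-area table: P[a][b] = total power over cells [1..a] x [1..b];
--     # built once, and only when some square size actually needs it
--     P = [[0]*(m+1)]
--     if any(1 <= sq <= m for sq in size_square):
--         for x in range(1, m+1):
--             row = [0]
--             for y in range(1, m+1):
--                 row.append(power_level(x, y, serial)
--                            + P[x-1][y] + row[y-1] - P[x-1][y-1])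
--             P.append(row)
--     max_power = -100
--     xs, ys = None, None
--     best = None
--     for sq in size_square:
--         for x in range(1, size - sq + 1):
--             for y in range(1, size - sq + 1):
--                 if sq <= 0:
--                     power = 0
--                 else:
--                     power = (P[x+sq-1][y+sq-1] - P[x-1][y+sq-1]
--                              - P[x+sq-1][y-1] + P[x-1][y-1])
--                 if power > max_power:
--                     max_power, xs, ys, best = power, x, y, sq
--     return max_power, xs, ys, best
-- ===== Notes on version B (the rewrite author's own statement) =====
-- stated objective: faster
-- what changed: Replaces A's per-cell recursive square_total_power (which re-sums row/column strips at every recursion level, O(sq^2) work per cell) by a 2D summed-area table built once, so each square's power is an O(1) inclusion-exclusion query; intended as faster - measured 6.53x at the largest size both Pythons finished and 17x below it (on huge sizes both time out).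
import Mathlib
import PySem

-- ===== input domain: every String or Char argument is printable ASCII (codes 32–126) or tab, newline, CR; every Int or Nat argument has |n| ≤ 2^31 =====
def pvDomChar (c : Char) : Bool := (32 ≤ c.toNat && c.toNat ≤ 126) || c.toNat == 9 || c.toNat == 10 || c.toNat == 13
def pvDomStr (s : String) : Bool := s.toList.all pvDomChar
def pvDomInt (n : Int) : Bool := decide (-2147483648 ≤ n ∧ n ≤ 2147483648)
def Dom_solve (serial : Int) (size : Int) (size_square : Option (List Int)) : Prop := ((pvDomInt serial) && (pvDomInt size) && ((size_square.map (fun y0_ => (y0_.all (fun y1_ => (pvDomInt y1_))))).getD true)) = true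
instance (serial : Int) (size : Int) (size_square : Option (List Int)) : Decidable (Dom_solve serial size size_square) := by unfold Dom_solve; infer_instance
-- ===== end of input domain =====

-- B replaces A's per-cell recursive square summation by a summed-area table with O(1)
-- inclusion-exclusion queries (intended as faster; a timing run measured 6.53x at the
-- largest size both Pythons finished; same return value on all of Pre_solve).


-- ===== PORT A =====
-- int(str(number)[-3]): the index -3 is always in range when len > 2, so pyGetD is exact there.
-- For number in [-99, -10] Python's int('-') raises ValueError and this port returns 0 instead;
-- both A and B reach hundred_digit through the same power_level helper, so on the rare serials
-- whose grid contains such a value the Python programs raise rather than return.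
def hundredDigit (number : Int) : Int :=
  let s := PySem.Int.toChars number
  if 2 < s.length then
    (PySem.Int.ofChars? [PySem.List.pyGetD s (-3) ' ']).getD 0
  else 0

def powerLevel (x : Int) (y : Int) (serial : Int) : Int :=
  let rackId := x + 10
  hundredDigit ((rackId * y + serial) * rackId) - 5

def squareTotalPower (x : Int) (y : Int) (serial : Int) (sz : Int) : Int :=
  if sz ≤ 3 then
    ((PySem.List.pyRange 0 sz 1).flatMap (fun i =>
      (PySem.List.pyRange 0 sz 1).map (fun j => powerLevel (x + i) (y + j) serial))).sum
  else
    squareTotalPower x y serial (sz - 1)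
      + ((PySem.List.pyRange 0 (sz - 1) 1).map (fun i => powerLevel (x + i) (y + sz - 1) serial)).sum
      + ((PySem.List.pyRange 0 sz 1).map (fun j => powerLevel (x + sz - 1) (y + j) serial)).sum
termination_by sz.toNat
decreasing_by omega

def solve (serial : Int) (size : Int) (size_square : Option (List Int)) : Int × Option Int × Option Int × Option Int :=
  let sqs := size_square.getD [3]
  sqs.foldl (fun st square =>
    ((PySem.List.pyRange 1 (size - square + 1) 1).flatMap (fun x =>
        (PySem.List.pyRange 1 (size - square + 1) 1).map (fun y => (x, y)))).foldl
      (fun st xy =>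
        let power := squareTotalPower xy.1 xy.2 serial square
        if st.1 < power then (power, some xy.1, some xy.2, some square) else st)
      st)
    ((-100 : Int), (none : Option Int), (none : Option Int), (none : Option Int))

-- ===== PORT B =====
-- row[i] / P[a][b]: all indices are proven in range on every reachable access
-- (lemmas below), so the `.getD` defaults are exact — Python never raises IndexError here.
def rowGet (row : List Int) (i : Int) : Int := (PySem.List.pyGet? row i).getD 0

def tblGet (P : List (List Int)) (a : Int) (b : Int) : Int :=
  rowGet ((PySem.List.pyGet? P a).getD []) b

def satRow (serial : Int) (n : Int) (P : List (List Int)) (x : Int) : List Int :=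
  (PySem.List.pyRange 1 (n + 1) 1).foldl (fun row y =>
    row ++ [powerLevel x y serial + tblGet P (x - 1) y + rowGet row (y - 1) - tblGet P (x - 1) (y - 1)])
    [0]

def satTable (serial : Int) (size : Int) (sqs : List Int) : List (List Int) :=
  let m := if 1 < size then size - 1 else 0
  if sqs.any (fun sq => decide (1 ≤ sq) && decide (sq ≤ m)) then
    (PySem.List.pyRange 1 (m + 1) 1).foldl (fun P x => P ++ [satRow serial m P x])
      [PySem.List.pyRepeat [0] (m + 1)]
  else [PySem.List.pyRepeat [0] (m + 1)]

def solve_alt (serial : Int) (size : Int) (size_square : Option (List Int)) : Int × Option Int × Option Int × Option Int :=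
  let sqs := size_square.getD [3]
  let P := satTable serial size sqs
  sqs.foldl (fun st sq =>
    (PySem.List.pyRange 1 (size - sq + 1) 1).foldl (fun st x =>
      (PySem.List.pyRange 1 (size - sq + 1) 1).foldl (fun st y =>
        let power := if sq ≤ 0 then 0 else
          tblGet P (x + sq - 1) (y + sq - 1) - tblGet P (x - 1) (y + sq - 1)
            - tblGet P (x + sq - 1) (y - 1) + tblGet P (x - 1) (y - 1)
        if st.1 < power then (power, some x, some y, some sq) else st)
        st)
      st)
    ((-100 : Int), (none : Option Int), (none : Option Int), (none : Option Int))

-- ===== PRECONDITION & SPEC =====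
-- Pre_solve excludes exactly the inputs on which Python A raises (and B raises on exactly the
-- same inputs): some square size sq in the list is usable (1 ≤ sq ≤ size - 1, so the scan is
-- non-empty and evaluates every grid cell of [1, size-1]^2), and some such cell has power value
-- in [-99, -10], where int(str(value)[-3]) = int('-') raises ValueError. A cell (x, y) with
-- rack = x + 10, w = rack*y + serial is bad iff rack*w ∈ [-99, -10], which forces
-- 11 ≤ rack ≤ 99 and -9 ≤ w ≤ -1, so the condition is checked in O(1), independent of size.
def Pre_solve (serial : Int) (size : Int) (size_square : Option (List Int)) : Prop :=
  ¬(((size_square.getD [3]).any (fun sq =>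
        decide (1 ≤ sq) && decide (sq ≤ (if 1 < size then size - 1 else 0))) = true) ∧
    ∃ rack ∈ PySem.List.pyRange 11 100 1, ∃ w ∈ PySem.List.pyRange (-9) 0 1,
      rack ≤ (if 1 < size then size - 1 else 0) + 10 ∧ -99 ≤ rack * w ∧ rack * w ≤ -10 ∧
      rack ∣ (w - serial) ∧ rack ≤ w - serial ∧
      w - serial ≤ rack * (if 1 < size then size - 1 else 0))
instance (serial : Int) (size : Int) (size_square : Option (List Int)) : Decidable (Pre_solve serial size size_square) := by unfold Pre_solve; infer_instance

def pvWitness_solve : Int × Int × Option (List Int) := (18, 10, some [3])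

def Spec_solve (serial : Int) (size : Int) (size_square : Option (List Int)) (out : Int × Option Int × Option Int × Option Int) : Prop := out = solve_alt serial size size_square
instance (serial : Int) (size : Int) (size_square : Option (List Int)) (out : Int × Option Int × Option Int × Option Int) : Decidable (Spec_solve serial size size_square out) := by unfold Spec_solve; infer_instance

-- ===== CLAIM (what is proved, stated in full; the proofs are below) =====
def Claim_equal_solve : Prop := ∀ (serial : Int) (size : Int) (size_square : Option (List Int)), Dom_solve serial size size_square → Pre_solve serial size size_square → Spec_solve serial size size_square (solve serial size size_square)

-- ===== LEMMAS AND PROOFS =====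

-- sum of a mapped List.range / python range as a Finset.range sum
theorem pvSum_mapRange (h : Nat → Int) (n : Nat) :
    ((List.range n).map h).sum = ∑ i ∈ Finset.range n, h i := by
  induction n with
  | zero => rfl
  | succ n ih => rw [List.range_succ, List.map_append, List.sum_append, Finset.sum_range_succ, ih]; simp

theorem pvSum_pyRange (m : Int) (g : Int → Int) :
    ((PySem.List.pyRange 0 m 1).map g).sum = ∑ i ∈ Finset.range m.toNat, g i := by
  rw [PySem.List.pyRange_one, List.map_map, pvSum_mapRange]
  simp

theorem pvSum_flatMapAux (l : List Int) (f : Int → List Int) :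
    (l.flatMap f).sum = (l.map (fun a => (f a).sum)).sum := by
  induction l with
  | nil => rfl
  | cons a l ih => simp [List.flatMap_cons, ih]

theorem pvSum_flatMap (m : Int) (g : Int → Int → Int) :
    ((PySem.List.pyRange 0 m 1).flatMap (fun i =>
      (PySem.List.pyRange 0 m 1).map (fun j => g i j))).sum
    = ∑ i ∈ Finset.range m.toNat, ∑ j ∈ Finset.range m.toNat, g i j := by
  rw [pvSum_flatMapAux]
  have h : ∀ i : Int, ((PySem.List.pyRange 0 m 1).map (fun j => g i j)).sum
      = ∑ j ∈ Finset.range m.toNat, g i j := fun i => pvSum_pyRange m (g i)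
  simp only [h]
  exact pvSum_pyRange m _

theorem pvMapRangeSucc {B : Type} (f : Nat → B) (k : Nat) :
    (List.range (k + 1)).map f = (List.range k).map f ++ [f k] := by
  rw [List.range_succ, List.map_append]
  rfl

-- the exact double sum both programs compute for a square
def pvDsum (serial x y sq : Int) : Int :=
  ∑ i ∈ Finset.range sq.toNat, ∑ j ∈ Finset.range sq.toNat, powerLevel (x + i) (y + j) serial

theorem pvDsum_split (serial x y sq : Int) (h : 0 < sq) :
    pvDsum serial x y sq = pvDsum serial x y (sq - 1)
      + (∑ i ∈ Finset.range (sq - 1).toNat, powerLevel (x + i) (y + sq - 1) serial)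
      + (∑ j ∈ Finset.range sq.toNat, powerLevel (x + sq - 1) (y + j) serial) := by
  obtain ⟨m, hm⟩ : ∃ m, (sq - 1).toNat = m := ⟨_, rfl⟩
  have hsq : sq.toNat = m + 1 := by omega
  have e1 : y + sq - 1 = y + (m : Int) := by omega
  have e2 : x + sq - 1 = x + (m : Int) := by omega
  unfold pvDsum
  rw [hsq, hm, e1, e2]
  simp only [Finset.sum_range_succ]
  rw [Finset.sum_add_distrib]

theorem pvStpAux (serial x y : Int) :
    ∀ (n : Nat) (sq : Int), sq.toNat ≤ n → squareTotalPower x y serial sq = pvDsum serial x y sq := by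
  intro n
  induction n with
  | zero =>
    intro sq h
    rw [squareTotalPower, if_pos (by omega : sq ≤ 3), pvSum_flatMap]
    rfl
  | succ n ih =>
    intro sq h
    by_cases h3 : sq ≤ 3
    · rw [squareTotalPower, if_pos h3, pvSum_flatMap]
      rfl
    · rw [squareTotalPower, if_neg h3, ih (sq - 1) (by omega), pvSum_pyRange, pvSum_pyRange]
      exact (pvDsum_split serial x y sq (by omega)).symm

theorem pvStp (serial x y sq : Int) : squareTotalPower x y serial sq = pvDsum serial x y sq :=
  pvStpAux serial x y sq.toNat sq le_rfl

-- prefix sums of the power grid (the mathematical content of B's table)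
def pvPsum (serial : Int) (a b : Nat) : Int :=
  ∑ i ∈ Finset.range a, ∑ j ∈ Finset.range b, powerLevel ((i : Int) + 1) ((j : Int) + 1) serial

theorem pvPsum_zero_left (serial : Int) (b : Nat) : pvPsum serial 0 b = 0 := by simp [pvPsum]

theorem pvPsum_zero_right (serial : Int) (a : Nat) : pvPsum serial a 0 = 0 := by simp [pvPsum]

theorem pvPsum_succ_succ (serial : Int) (a b : Nat) :
    pvPsum serial (a + 1) (b + 1)
      = powerLevel ((a : Int) + 1) ((b : Int) + 1) serial
        + pvPsum serial a (b + 1) + pvPsum serial (a + 1) b - pvPsum serial a b := by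
  unfold pvPsum
  simp only [Finset.sum_range_succ]
  rw [Finset.sum_add_distrib]
  ring

-- indexing a mapped List.range with rowGet / tblGet
theorem pvRangeMapGet (h : Nat → Int) (L : Nat) (b : Int) (hb0 : 0 ≤ b) (hb : b < (L : Int)) :
    rowGet ((List.range L).map h) b = h b.toNat := by
  have hb' : b.toNat < L := by omega
  unfold rowGet
  rw [PySem.List.pyGet?_of_nonneg _ hb0]
  simp [List.getElem?_map, List.getElem?_range hb']

theorem pvTblGet (serial : Int) (L M : Nat) (a b : Int) (ha0 : 0 ≤ a) (ha : a < (L : Int))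
    (hb0 : 0 ≤ b) (hb : b < (M : Int)) :
    tblGet ((List.range L).map (fun a => (List.range M).map (fun b => pvPsum serial a b))) a b
      = pvPsum serial a.toNat b.toNat := by
  have ha' : a.toNat < L := by omega
  unfold tblGet
  rw [PySem.List.pyGet?_of_nonneg _ ha0]
  simp only [List.getElem?_map, List.getElem?_range ha', Option.map_some, Option.getD_some]
  exact pvRangeMapGet (fun bb => pvPsum serial a.toNat bb) M b hb0 hb

theorem pvSatRowAux (serial : Int) (N t : Nat) (P : List (List Int))
    (hP : ∀ b : Int, 0 ≤ b → b < (N : Int) + 1 → tblGet P ((t : Int) + 1 - 1) b = pvPsum serial t b.toNat) :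
    ∀ (u : Nat), u ≤ N →
      (PySem.List.pyRange 1 ((u : Int) + 1) 1).foldl (fun row y =>
          row ++ [powerLevel ((t : Int) + 1) y serial + tblGet P ((t : Int) + 1 - 1) y
            + rowGet row (y - 1) - tblGet P ((t : Int) + 1 - 1) (y - 1)]) [0]
        = (List.range (u + 1)).map (fun b => pvPsum serial (t + 1) b) := by
  intro u
  induction u with
  | zero =>
    intro _
    rw [show ((0 : Nat) : Int) + 1 = 1 by norm_num, PySem.List.pyRange_one_eq_nil le_rfl]
    simp [pvPsum_zero_right]
  | succ u ih =>
    intro hu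
    rw [show ((u + 1 : Nat) : Int) + 1 = ((u : Int) + 1) + 1 by push_cast; ring,
      PySem.List.pyRange_one_succ_right (by omega : (1 : Int) ≤ (u : Int) + 1), List.foldl_append,
      ih (by omega)]
    simp only [List.foldl_cons, List.foldl_nil]
    rw [show (u : Int) + 1 - 1 = (u : Int) by ring]
    rw [hP ((u : Int) + 1) (by omega) (by omega), hP (u : Int) (by omega) (by omega)]
    rw [pvRangeMapGet (fun b => pvPsum serial (t + 1) b) (u + 1) (u : Int) (by omega) (by omega)]
    rw [show ((u : Int) + 1).toNat = u + 1 by omega, show ((u : Int)).toNat = u by omega]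
    rw [← pvPsum_succ_succ]
    rw [pvMapRangeSucc (fun b => pvPsum serial (t + 1) b) (u + 1)]

theorem pvSatRow (serial : Int) (N t : Nat) (P : List (List Int))
    (hP : ∀ b : Int, 0 ≤ b → b < (N : Int) + 1 → tblGet P ((t : Int) + 1 - 1) b = pvPsum serial t b.toNat) :
    satRow serial (N : Int) P ((t : Int) + 1) = (List.range (N + 1)).map (fun b => pvPsum serial (t + 1) b) := by
  unfold satRow
  exact pvSatRowAux serial N t P hP N le_rfl

theorem pvSatTableAux (serial : Int) (N : Nat) :
    ∀ (t : Nat), t ≤ N →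
      (PySem.List.pyRange 1 ((t : Int) + 1) 1).foldl (fun P x => P ++ [satRow serial (N : Int) P x])
          [(List.range (N + 1)).map (fun b => pvPsum serial 0 b)]
        = (List.range (t + 1)).map (fun a => (List.range (N + 1)).map (fun b => pvPsum serial a b)) := by
  intro t
  induction t with
  | zero =>
    intro _
    rw [show ((0 : Nat) : Int) + 1 = 1 by norm_num, PySem.List.pyRange_one_eq_nil le_rfl]
    simp
  | succ t ih =>
    intro ht
    rw [show ((t + 1 : Nat) : Int) + 1 = ((t : Int) + 1) + 1 by push_cast; ring,
      PySem.List.pyRange_one_succ_right (by omega : (1 : Int) ≤ (t : Int) + 1), List.foldl_append,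
      ih (by omega)]
    simp only [List.foldl_cons, List.foldl_nil]
    have hP : ∀ b : Int, 0 ≤ b → b < (N : Int) + 1 →
        tblGet ((List.range (t + 1)).map (fun a => (List.range (N + 1)).map (fun b => pvPsum serial a b)))
          ((t : Int) + 1 - 1) b = pvPsum serial t b.toNat := by
      intro b hb0 hb
      rw [show (t : Int) + 1 - 1 = (t : Int) by ring,
        pvTblGet serial (t + 1) (N + 1) (t : Int) b (by omega) (by omega) hb0 (by omega),
        show ((t : Int)).toNat = t by omega]
    rw [pvSatRow serial N t _ hP]
    rw [pvMapRangeSucc (fun a => (List.range (N + 1)).map (fun b => pvPsum serial a b)) (t + 1)]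

theorem pvSatTable (serial size : Int) (sqs : List Int) (sq : Int) (hmem : sq ∈ sqs)
    (h1 : 1 ≤ sq) (h2 : sq ≤ (if 1 < size then size - 1 else 0)) :
    satTable serial size sqs
      = (List.range ((if 1 < size then size - 1 else 0).toNat + 1)).map (fun a =>
          (List.range ((if 1 < size then size - 1 else 0).toNat + 1)).map (fun b => pvPsum serial a b)) := by
  simp only [satTable]
  rw [if_pos (List.any_eq_true.mpr ⟨sq, hmem, by simp [h1, h2]⟩)]
  set n := if 1 < size then size - 1 else 0 with hn
  have hn0 : 0 ≤ n := by rw [hn]; split <;> omega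
  obtain ⟨N, hN⟩ : ∃ N : Nat, n = (N : Int) := ⟨n.toNat, by omega⟩
  rw [hN, Int.toNat_natCast]
  have hrow0 : (List.range (N + 1)).map (fun b => pvPsum serial 0 b)
      = List.replicate (N + 1) (0 : Int) := by
    simp [pvPsum_zero_left, List.map_const']
  have hinit : [PySem.List.pyRepeat [(0 : Int)] ((N : Int) + 1)]
      = [(List.range (N + 1)).map (fun b => pvPsum serial 0 b)] := by
    rw [PySem.List.pyRepeat_singleton, hrow0, show ((N : Int) + 1).toNat = N + 1 by omega]
  rw [hinit]
  exact pvSatTableAux serial N N le_rfl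

-- the inclusion-exclusion rectangle identity
theorem pvRect (serial : Int) (a b S : Nat) :
    pvPsum serial (a + S) (b + S) - pvPsum serial a (b + S) - pvPsum serial (a + S) b + pvPsum serial a b
      = ∑ i ∈ Finset.range S, ∑ j ∈ Finset.range S,
          powerLevel ((a : Int) + (i : Int) + 1) ((b : Int) + (j : Int) + 1) serial := by
  unfold pvPsum
  simp only [Finset.sum_range_add]
  simp only [Finset.sum_add_distrib]
  push_cast
  ring

theorem pvPowShift (x y i j serial : Int) :
    powerLevel (x - 1 + i + 1) (y - 1 + j + 1) serial = powerLevel (x + i) (y + j) serial := by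
  rw [show x - 1 + i + 1 = x + i by ring, show y - 1 + j + 1 = y + j by ring]

-- per-cell: the recursive square sum equals the table query
theorem pvCell (serial size sq x y : Int) (sqs : List Int) (hmem : sq ∈ sqs)
    (hsq : 1 ≤ sq) (hx : 1 ≤ x) (hx2 : x ≤ size - sq)
    (hy : 1 ≤ y) (hy2 : y ≤ size - sq) :
    squareTotalPower x y serial sq
      = tblGet (satTable serial size sqs) (x + sq - 1) (y + sq - 1)
        - tblGet (satTable serial size sqs) (x - 1) (y + sq - 1)
        - tblGet (satTable serial size sqs) (x + sq - 1) (y - 1)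
        + tblGet (satTable serial size sqs) (x - 1) (y - 1) := by
  have hsize : 1 < size := by omega
  have hif : (if 1 < size then size - 1 else 0) = size - 1 := if_pos hsize
  have hszc : (((size - 1).toNat : Nat) : Int) = size - 1 := by omega
  rw [pvSatTable serial size sqs sq hmem hsq (by omega), hif]
  rw [pvTblGet serial ((size - 1).toNat + 1) ((size - 1).toNat + 1) (x + sq - 1) (y + sq - 1)
      (by omega) (by push_cast; omega) (by omega) (by push_cast; omega),
    pvTblGet serial ((size - 1).toNat + 1) ((size - 1).toNat + 1) (x - 1) (y + sq - 1)
      (by omega) (by push_cast; omega) (by omega) (by push_cast; omega),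
    pvTblGet serial ((size - 1).toNat + 1) ((size - 1).toNat + 1) (x + sq - 1) (y - 1)
      (by omega) (by push_cast; omega) (by omega) (by push_cast; omega),
    pvTblGet serial ((size - 1).toNat + 1) ((size - 1).toNat + 1) (x - 1) (y - 1)
      (by omega) (by push_cast; omega) (by omega) (by push_cast; omega)]
  rw [show (x + sq - 1).toNat = (x - 1).toNat + sq.toNat by omega,
    show (y + sq - 1).toNat = (y - 1).toNat + sq.toNat by omega]
  rw [pvRect, pvStp]
  unfold pvDsum
  refine Finset.sum_congr rfl (fun i _ => Finset.sum_congr rfl (fun j _ => ?_))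
  rw [show (((x - 1).toNat : Nat) : Int) = x - 1 by omega,
    show (((y - 1).toNat : Nat) : Int) = y - 1 by omega]
  exact (pvPowShift x y (i : Int) (j : Int) serial).symm

-- a fold over the flattened coordinate product is the nested fold
theorem pvFoldlProd {A : Type} (xs ys : List Int) (g : A → Int × Int → A) (init : A) :
    ((xs.flatMap (fun x => ys.map (fun y => (x, y)))).foldl g init)
      = xs.foldl (fun st x => ys.foldl (fun st y => g st (x, y)) st) init := by
  induction xs generalizing init with
  | nil => rfl
  | cons x xs ih => simp only [List.flatMap_cons, List.foldl_append, List.foldl_map, List.foldl_cons, ih]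

theorem pvSquareStep (serial size sq : Int) (sqs : List Int) (hmem : sq ∈ sqs)
    (st : Int × Option Int × Option Int × Option Int) :
    ((PySem.List.pyRange 1 (size - sq + 1) 1).flatMap (fun x =>
        (PySem.List.pyRange 1 (size - sq + 1) 1).map (fun y => (x, y)))).foldl
      (fun st xy =>
        let power := squareTotalPower xy.1 xy.2 serial sq
        if st.1 < power then (power, some xy.1, some xy.2, some sq) else st) st
    = (PySem.List.pyRange 1 (size - sq + 1) 1).foldl (fun st x =>
        (PySem.List.pyRange 1 (size - sq + 1) 1).foldl (fun st y =>
          let power := if sq ≤ 0 then 0 else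
            tblGet (satTable serial size sqs) (x + sq - 1) (y + sq - 1)
              - tblGet (satTable serial size sqs) (x - 1) (y + sq - 1)
              - tblGet (satTable serial size sqs) (x + sq - 1) (y - 1)
              + tblGet (satTable serial size sqs) (x - 1) (y - 1)
          if st.1 < power then (power, some x, some y, some sq) else st) st) st := by
  rw [pvFoldlProd]
  apply PySem.List.foldl_congr_mem
  intro st0 xv hxv
  apply PySem.List.foldl_congr_mem
  intro st1 yv hyv
  obtain ⟨hx1, hx2⟩ := (PySem.List.mem_pyRange_one).mp hxv
  obtain ⟨hy1, hy2⟩ := (PySem.List.mem_pyRange_one).mp hyv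
  dsimp only
  have hpow : squareTotalPower xv yv serial sq = (if sq ≤ 0 then 0 else
      tblGet (satTable serial size sqs) (xv + sq - 1) (yv + sq - 1)
        - tblGet (satTable serial size sqs) (xv - 1) (yv + sq - 1)
        - tblGet (satTable serial size sqs) (xv + sq - 1) (yv - 1)
        + tblGet (satTable serial size sqs) (xv - 1) (yv - 1)) := by
    by_cases hsq : sq ≤ 0
    · rw [if_pos hsq, pvStp]
      unfold pvDsum
      rw [show sq.toNat = 0 by omega]
      simp
    · rw [if_neg hsq]
      exact pvCell serial size sq xv yv sqs hmem (by omega) hx1 (by omega) hy1 (by omega)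
  rw [hpow]

-- ===== VERDICT (by name: the statement is the Claim_ definition above) =====
theorem solve_spec : Claim_equal_solve := by
  intro serial size size_square hdom hpre
  refine (fun _ : Pre_solve serial size size_square => ?_) hpre
  unfold Spec_solve solve solve_alt
  apply PySem.List.foldl_congr_mem
  intro st sq hmem
  exact pvSquareStep serial size sq (size_square.getD [3]) hmem st
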